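-- pv_equiv track=rewrite | github.com/dkalpakchi/SweCTRL-Mini | gen_hp_search/analyze.py | check_repeated_words
-- ===== SOURCE A (Python) =====
-- from collections import defaultdict
--
-- def check_repeated_words(text, max_window=5):
--     repeats = defaultdict(int)
--
--     # very rough version of tokens
--     tokens = [x.strip() for x in text.split()]
--     num_tokens = len(tokens)
--
--     for w in range(1, max_window+1):
--         for i in range(w, num_tokens):
--             if tokens[i:i+w] == tokens[i-w:i]:
--                 repeats[w] += 1
--     return repeats
-- ===== SOURCE B (Python) =====
-- from collections import defaultdict
--
-- def check_repeated_words(text, max_window=5):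
--     repeats = defaultdict(int)
--
--     # very rough version of tokens (same tokenization as A)
--     tokens = [x.strip() for x in text.split()]
--     num_tokens = len(tokens)
--
--     # Staged per window size w: (1) a table eq[t] saying whether the token at
--     # position w+t equals the one w places earlier, (2) its prefix sums, and
--     # (3) a count of the starting positions i whose w consecutive table
--     # entries are all True (a prefix-sum difference of exactly w); that is
--     # precisely one hit of A's slice comparison, no slices are built.
--     for w in range(1, max_window + 1):
--         eq = [tokens[k] == tokens[k - w] for k in range(w, num_tokens)]
--         pref = [0]
--         s = 0
--         for b in eq:
--             s += b
--             pref.append(s)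
--         c = sum(1 for i in range(len(eq) - w + 1) if pref[i + w] - pref[i] == w)
--         if c:
--             repeats[w] = c
--     return repeats
-- ===== Notes on version B (the rewrite author's own statement) =====
-- stated objective: alternative
-- what changed: Replaces the per-position slice building/comparing with three staged passes per window size: an equality table eq[t] = (tokens[w+t] == tokens[t]), its prefix sums, and a count of starting positions whose prefix-sum difference over w entries is exactly w; only window sizes with a positive count are inserted into the dict.
import Mathlib
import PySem

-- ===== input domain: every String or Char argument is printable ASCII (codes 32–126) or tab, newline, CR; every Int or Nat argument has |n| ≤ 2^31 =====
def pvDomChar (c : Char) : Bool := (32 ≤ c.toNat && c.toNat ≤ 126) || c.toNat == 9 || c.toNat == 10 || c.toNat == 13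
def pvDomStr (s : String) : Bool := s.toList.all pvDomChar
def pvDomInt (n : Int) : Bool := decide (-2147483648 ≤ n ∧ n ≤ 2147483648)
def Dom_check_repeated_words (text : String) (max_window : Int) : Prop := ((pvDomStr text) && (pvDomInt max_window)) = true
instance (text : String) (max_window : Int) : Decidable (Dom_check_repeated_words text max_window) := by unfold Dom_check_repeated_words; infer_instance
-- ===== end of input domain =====

-- B replaces A's per-position slice compares with staged passes per window size (equality table, prefix sums, window count); same return value.

-- ===== PORT A =====
def check_repeated_words (text : String) (max_window : Int) : List (Int × Int) :=
  let tokens := (PySem.Str.split₀ text).map (fun x => PySem.Str.strip x)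
  let num_tokens : Int := PySem.List.len tokens
  let repeats := (PySem.List.pyRange 1 (max_window + 1) 1).foldl (fun r w =>
    (PySem.List.pyRange w num_tokens 1).foldl (fun r i =>
      if PySem.List.slice tokens (some i) (some (i + w)) == PySem.List.slice tokens (some (i - w)) (some i)
      then r.modify w 0 (· + 1) else r) r) (PySem.Dict.empty : PySem.Dict Int Int)
  repeats.items

-- ===== PORT B =====
-- indices into tokens/pref are always in range where they are evaluated, so pyGetD is exact
def check_repeated_words_alt (text : String) (max_window : Int) : List (Int × Int) :=
  let tokens := (PySem.Str.split₀ text).map (fun x => PySem.Str.strip x)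
  let num_tokens : Int := PySem.List.len tokens
  let repeats := (PySem.List.pyRange 1 (max_window + 1) 1).foldl (fun r w =>
    let eq := (PySem.List.pyRange w num_tokens 1).map (fun k =>
      PySem.List.pyGetD tokens k "" == PySem.List.pyGetD tokens (k - w) "")
    let pref := (eq.foldl (fun sp b =>
      let s := sp.1 + (if b then (1 : Int) else 0)
      (s, sp.2 ++ [s])) ((0 : Int), [(0 : Int)])).2
    let c : Int := (((PySem.List.pyRange 0 (PySem.List.len eq - w + 1) 1).filter (fun i =>
      PySem.List.pyGetD pref (i + w) 0 - PySem.List.pyGetD pref i 0 == w)).map (fun _ => (1 : Int))).sum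
    if c ≠ 0 then r.insert w c else r) (PySem.Dict.empty : PySem.Dict Int Int)
  repeats.items

-- ===== PRECONDITION & SPEC =====
def Spec_check_repeated_words (text : String) (max_window : Int) (out : List (Int × Int)) : Prop := out = check_repeated_words_alt text max_window
instance (text : String) (max_window : Int) (out : List (Int × Int)) : Decidable (Spec_check_repeated_words text max_window out) := by unfold Spec_check_repeated_words; infer_instance

-- ===== CLAIM (what is proved, stated in full; the proofs are below) =====
def Claim_equal_check_repeated_words : Prop := ∀ (text : String) (max_window : Int), Dom_check_repeated_words text max_window → Spec_check_repeated_words text max_window (check_repeated_words text max_window)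

-- ===== LEMMAS AND PROOFS =====

-- proof-side helpers: pvEqs = "token W+t equals token t"; pvStepA/pvStepB = the two inner loop bodies;
-- pvBump d w n = d with key w incremented n times
def pvEqs (toks : List String) (W t : Nat) : Bool := toks.getD (W + t) "" == toks.getD t ""

def pvStepA (toks : List String) (r : PySem.Dict Int Int) (w : Int) : PySem.Dict Int Int :=
  (PySem.List.pyRange w (PySem.List.len toks) 1).foldl (fun r i =>
    if PySem.List.slice toks (some i) (some (i + w)) == PySem.List.slice toks (some (i - w)) (some i)
    then r.modify w 0 (· + 1) else r) r

def pvStepB (toks : List String) (r : PySem.Dict Int Int) (w : Int) : PySem.Dict Int Int :=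
  let eq := (PySem.List.pyRange w (PySem.List.len toks) 1).map (fun k =>
    PySem.List.pyGetD toks k "" == PySem.List.pyGetD toks (k - w) "")
  let pref := (eq.foldl (fun sp b =>
    let s := sp.1 + (if b then (1 : Int) else 0)
    (s, sp.2 ++ [s])) ((0 : Int), [(0 : Int)])).2
  let c : Int := (((PySem.List.pyRange 0 (PySem.List.len eq - w + 1) 1).filter (fun i =>
    PySem.List.pyGetD pref (i + w) 0 - PySem.List.pyGetD pref i 0 == w)).map (fun _ => (1 : Int))).sum
  if c ≠ 0 then r.insert w c else r

def pvBump (d : PySem.Dict Int Int) (w : Int) : Nat → PySem.Dict Int Int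
  | 0 => d
  | n+1 => (pvBump d w n).modify w 0 (· + 1)

theorem pvBump_modify (d : PySem.Dict Int Int) (w : Int) (n : Nat) :
    pvBump (d.modify w 0 (· + 1)) w n = pvBump d w (n+1) := by
  induction n with
  | zero => rfl
  | succ n ih => simp [pvBump, ih]

theorem pvBump_foldl {α : Type} (l : List α) (d : PySem.Dict Int Int) (w : Int) :
    l.foldl (fun r _ => r.modify w 0 (· + 1)) d = pvBump d w l.length := by
  induction l generalizing d with
  | nil => rfl
  | cons a l ih => simp [List.foldl, ih, pvBump_modify]

-- modify on a fresh key is an insert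
theorem pvModify_fresh (d : PySem.Dict Int Int) (w : Int)
    (hk : d.keys.Nodup) (hc : d.contains w = false) :
    d.modify w 0 (· + 1) = d.insert w 1 := by
  have hk1 : (d.modify w 0 (· + 1)).keys = (d.insert w 1).keys := by
    rw [PySem.Dict.keys_modify, PySem.Dict.getD_of_not_contains d 0 hc]; norm_num
  have hnd1 : (d.modify w 0 (· + 1)).keys.Nodup := by
    rw [hk1]; exact PySem.Dict.nodup_keys_insert _ _ _ hk
  apply PySem.Dict.ext
  rw [PySem.Dict.items_eq_map_keys _ hnd1 0,
      PySem.Dict.items_eq_map_keys _ (PySem.Dict.nodup_keys_insert _ _ _ hk) 0, hk1]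
  apply List.map_congr_left
  intro k hkm
  simp only [PySem.Dict.getD_modify, PySem.Dict.getD_insert, Prod.mk.injEq, true_and]
  split_ifs with h
  · simp [PySem.Dict.getD_of_not_contains d 0 hc]
  · rfl

-- modify after an insert at the same key updates in place
theorem pvModify_insert (d : PySem.Dict Int Int) (w : Int) (v : Int) (hk : d.keys.Nodup) :
    (d.insert w v).modify w 0 (· + 1) = d.insert w (v + 1) := by
  have hk1 : ((d.insert w v).modify w 0 (· + 1)).keys = (d.insert w (v + 1)).keys := by
    rw [PySem.Dict.keys_modify, PySem.Dict.getD_insert_self, PySem.Dict.insert_insert_self]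
  have hnd1 : ((d.insert w v).modify w 0 (· + 1)).keys.Nodup := by
    rw [hk1]; exact PySem.Dict.nodup_keys_insert _ _ _ hk
  apply PySem.Dict.ext
  rw [PySem.Dict.items_eq_map_keys _ hnd1 0,
      PySem.Dict.items_eq_map_keys _ (PySem.Dict.nodup_keys_insert _ _ _ hk) 0, hk1]
  apply List.map_congr_left
  intro k hkm
  simp only [PySem.Dict.getD_modify, PySem.Dict.getD_insert, Prod.mk.injEq, true_and]
  split_ifs with h
  · simp
  · rfl

theorem pvBump_fresh (d : PySem.Dict Int Int) (w : Int)
    (hk : d.keys.Nodup) (hc : d.contains w = false) (n : Nat) :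
    pvBump d w n = if n = 0 then d else d.insert w (n : Int) := by
  induction n with
  | zero => rfl
  | succ n ih =>
    cases n with
    | zero =>
      show (pvBump d w 0).modify w 0 (· + 1) = _
      simp only [pvBump]
      rw [pvModify_fresh d w hk hc]; norm_num
    | succ m =>
      simp only [pvBump] at ih ⊢
      rw [ih]
      simp only [Nat.succ_ne_zero, if_false]
      rw [pvModify_insert d w _ hk]
      push_cast; ring_nf

-- pvWin = "the w-window starting at t repeats the previous one"
def pvWin (toks : List String) (W t : Nat) : Bool := (List.range W).all (fun j => pvEqs toks W (t + j))

-- the prefix-sum fold of B, characterised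
theorem pvPref_foldl (bs : List Bool) (s0 : Int) (p0 : List Int) :
    bs.foldl (fun sp b =>
      let s := sp.1 + (if b then (1 : Int) else 0)
      (s, sp.2 ++ [s])) (s0, p0)
    = (s0 + ((bs.countP id : Nat) : Int),
       p0 ++ (List.range bs.length).map (fun j => s0 + (((bs.take (j+1)).countP id : Nat) : Int))) := by
  induction bs generalizing s0 p0 with
  | nil => simp
  | cons b bs ih =>
    simp only [List.foldl_cons]
    rw [ih]
    simp only [Prod.mk.injEq]
    refine ⟨?_, ?_⟩
    · rw [List.countP_cons]
      cases b <;> push_cast <;> simp <;> ring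
    · rw [List.length_cons, List.range_succ_eq_map, List.map_cons, List.map_map, List.append_assoc,
          List.singleton_append]
      congr 1
      refine List.cons_eq_cons.mpr ⟨?_, ?_⟩
      · cases b <;> simp
      · apply List.map_congr_left
        intro j hj
        simp only [Function.comp, Nat.succ_eq_add_one]
        rw [List.take_succ_cons, List.countP_cons]
        cases b <;> push_cast <;> simp <;> ring

theorem pvPref_getD (bs : List Bool) (j : Nat) (hj : j ≤ bs.length) :
    (((0 : Int) :: (List.range bs.length).map (fun j => (((bs.take (j+1)).countP id : Nat) : Int))).getD j 0)
    = (((bs.take j).countP id : Nat) : Int) := by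
  cases j with
  | zero => simp
  | succ j =>
    rw [List.getD_cons_succ, PySem.List.getD_map_range _ _ _ _ (by omega)]

-- B's equality table is the pvEqs table
theorem pvEq_list (toks : List String) (w : Int) (hw : 1 ≤ w) :
    (PySem.List.pyRange w (PySem.List.len toks) 1).map (fun k =>
      PySem.List.pyGetD toks k "" == PySem.List.pyGetD toks (k - w) "")
    = (List.range (toks.length - w.toNat)).map (pvEqs toks w.toNat) := by
  rw [PySem.List.pyRange_one, List.map_map]
  have hlen : ((PySem.List.len toks) - w).toNat = toks.length - w.toNat := by
    simp only [PySem.List.len_eq]; omega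
  rw [hlen]
  apply List.map_congr_left
  intro t ht
  simp only [Function.comp]
  rw [show w + (t : Int) = ((w.toNat + t : Nat) : Int) by omega]
  rw [show ((w.toNat + t : Nat) : Int) - w = ((t : Nat) : Int) by omega]
  rw [PySem.List.pyGetD_natCast, PySem.List.pyGetD_natCast]
  rfl

-- A's slice condition, characterised
theorem pvCondA_iff (toks : List String) (W t : Nat) (hW : 1 ≤ W) (ht : t < toks.length - W)
    (hWN : W ≤ toks.length) :
    (((toks.drop (W + t)).take W == (toks.drop t).take W) = true) ↔
      (W + t + W ≤ toks.length ∧ ∀ j < W, pvEqs toks W (t + j) = true) := by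
  rw [beq_iff_eq]
  have hlen2 : ((toks.drop t).take W).length = W := by
    simp [List.length_take, List.length_drop]; omega
  constructor
  · intro he
    have hlen1 : ((toks.drop (W + t)).take W).length = W := by rw [he, hlen2]
    have hle : W + t + W ≤ toks.length := by
      simp [List.length_take, List.length_drop] at hlen1; omega
    refine ⟨hle, fun j hj => ?_⟩
    have h1 : ((toks.drop (W + t)).take W)[j]'(by rw [hlen1]; exact hj)
            = ((toks.drop t).take W)[j]'(by rw [hlen2]; exact hj) := by
      simp only [he]
    simp only [List.getElem_take, List.getElem_drop] at h1
    simp only [pvEqs, ← Nat.add_assoc]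
    rw [List.getD_eq_getElem _ _ (show W + t + j < toks.length by omega),
        List.getD_eq_getElem _ _ (show t + j < toks.length by omega), beq_iff_eq]
    exact h1
  · rintro ⟨hle, hall⟩
    apply List.ext_getElem
    · rw [hlen2]; simp [List.length_take, List.length_drop]; omega
    · intro j hj1 hj2
      have hjW : j < W := by
        simp [List.length_take, List.length_drop] at hj1; omega
      simp only [List.getElem_take, List.getElem_drop]
      have := hall j hjW
      simp only [pvEqs, ← Nat.add_assoc, beq_iff_eq] at this
      rw [List.getD_eq_getElem _ _ (show W + t + j < toks.length by omega),
          List.getD_eq_getElem _ _ (show t + j < toks.length by omega)] at this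
      exact this

theorem pvCountP_range_upper (p : Nat → Bool) (c T : Nat) (h : ∀ u < T, p u = true → u < c) :
    (List.range T).countP p = (List.range (min c T)).countP p := by
  by_cases hc : c ≤ T
  · have : T = c + (T - c) := by omega
    rw [min_eq_left hc]
    conv_lhs => rw [this]
    rw [List.range_add, List.countP_append]
    have h0 : ((List.range (T - c)).map (c + ·)).countP p = 0 := by
      rw [List.countP_eq_zero]
      intro u hu
      simp only [List.mem_map, List.mem_range] at hu
      obtain ⟨t, ht, rfl⟩ := hu
      intro hp; exact absurd (h _ (by omega) hp) (by omega)
    rw [h0, Nat.add_zero]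
  · rw [min_eq_right (by omega)]


theorem pvPref_getD' (bs : List Bool) (n : Nat) (hn : bs.length = n) (j : Nat) (hj : j ≤ n) :
    (((0 : Int) :: (List.range n).map (fun j => (((bs.take (j+1)).countP id : Nat) : Int))).getD j 0)
    = (((bs.take j).countP id : Nat) : Int) := by
  subst hn; exact pvPref_getD bs j hj

theorem pvTake_countP (toks : List String) (W j T : Nat) (hj : j ≤ T) :
    (((List.range T).map (pvEqs toks W)).take j).countP id = (List.range j).countP (pvEqs toks W) := by
  rw [← List.map_take, List.take_range, min_eq_left hj, List.countP_map]
  rfl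

theorem pvWindow_count (toks : List String) (W iN : Nat) :
    (List.range (iN + W)).countP (pvEqs toks W)
    = (List.range iN).countP (pvEqs toks W) + (List.range W).countP (fun j => pvEqs toks W (iN + j)) := by
  rw [List.range_add, List.countP_append, List.countP_map]
  rfl

theorem pvCount_eq_W_iff (toks : List String) (W iN : Nat) :
    ((List.range W).countP (fun j => pvEqs toks W (iN + j)) = W) ↔ pvWin toks W iN = true := by
  rw [pvWin, List.all_eq_true]
  constructor
  · intro h
    exact List.countP_eq_length.mp (h.trans (List.length_range).symm)
  · intro h
    exact (List.countP_eq_length.mpr h).trans (List.length_range)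

-- the two inner loop bodies agree on a dict not yet containing w
theorem pvStep_eq (toks : List String) (w : Int) (hw : 1 ≤ w) (r : PySem.Dict Int Int)
    (hk : r.keys.Nodup) (hc : r.contains w = false) :
    pvStepA toks r w = pvStepB toks r w := by
  have hwW : ((w.toNat : Int)) = w := by omega
  set W := w.toNat with hWdef
  set N := toks.length with hNdef
  set T := N - W with hTdef
  have hW1 : 1 ≤ W := by omega
  -- A side: the conditional fold is a bump by the number of positions passing the slice test
  have hA : pvStepA toks r w
      = pvBump r w ((List.range T).countP (fun (t : Nat) =>
          PySem.List.slice toks (some (w + (t : Int))) (some (w + (t : Int) + w)) ==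
          PySem.List.slice toks (some (w + (t : Int) - w)) (some (w + (t : Int))))) := by
    unfold pvStepA
    rw [PySem.List.foldl_if_eq_foldl_filter, pvBump_foldl, ← List.countP_eq_length_filter]
    rw [show PySem.List.len toks = (N : Int) by simp [hNdef]]
    rw [PySem.List.pyRange_one, List.countP_map]
    rw [show ((N : Int) - w).toNat = T by omega]
    rfl
  rw [hA]
  -- B side: expose the staged passes
  simp only [pvStepB]
  rw [pvEq_list toks w hw, pvPref_foldl]
  simp only [zero_add, List.singleton_append, PySem.List.len_eq, List.length_map,
    List.length_range]
  by_cases hTW : W ≤ T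
  · -- main case: both counts are the number of repeated windows
    have hWN : W ≤ N := by omega
    have hbs : ((List.range T).map (pvEqs toks W)).length = T := by
      rw [List.length_map, List.length_range]
    -- A's count
    have hcntA : (List.range T).countP (fun (t : Nat) =>
          PySem.List.slice toks (some (w + (t : Int))) (some (w + (t : Int) + w)) ==
          PySem.List.slice toks (some (w + (t : Int) - w)) (some (w + (t : Int))))
        = (List.range (T - W + 1)).countP (pvWin toks W) := by
      rw [List.countP_congr (q := fun t => decide (W + t + W ≤ N) && pvWin toks W t) ?_]
      · rw [pvCountP_range_upper _ (T - W + 1) T ?_, min_eq_left (by omega)]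
        · apply List.countP_congr
          intro t ht
          simp only [List.mem_range] at ht
          simp only [Bool.and_eq_true, decide_eq_true_iff]
          constructor
          · exact fun h => h.2
          · exact fun h => ⟨by omega, h⟩
        · intro u hu hp
          simp only [Bool.and_eq_true, decide_eq_true_iff] at hp
          omega
      · intro t ht
        simp only [List.mem_range] at ht
        rw [show w + (t : Int) - w = ((t : Nat) : Int) by omega]
        rw [show w + (t : Int) + w = ((W + t + W : Nat) : Int) by omega]
        rw [show w + (t : Int) = ((W + t : Nat) : Int) by omega]
        rw [PySem.List.slice_natCast, PySem.List.slice_natCast]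
        rw [show W + t + W - (W + t) = W by omega, show W + t - t = W by omega]
        rw [pvCondA_iff toks W t hW1 (by omega) hWN]
        simp only [Bool.and_eq_true, decide_eq_true_iff, pvWin, List.all_eq_true,
          List.mem_range]
        constructor
        · exact fun h => ⟨h.1, fun j hj => h.2 j hj⟩
        · exact fun h => ⟨h.1, fun j hj => h.2 j hj⟩
    rw [hcntA]
    -- B's count
    rw [show ((T : Int) - w + 1) = ((T - W + 1 : Nat) : Int) by omega]
    rw [PySem.List.sum_map_const_int, ← List.countP_eq_length_filter]
    rw [PySem.List.pyRange_one, List.countP_map]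
    rw [show (((T - W + 1 : Nat) : Int) - 0).toNat = T - W + 1 by omega]
    have hcntB : (List.range (T - W + 1)).countP ((fun i =>
          PySem.List.pyGetD ((0 : Int) :: (List.range T).map
            (fun j => (((((List.range T).map (pvEqs toks W)).take (j+1)).countP id : Nat) : Int))) (i + w) 0
          - PySem.List.pyGetD ((0 : Int) :: (List.range T).map
            (fun j => (((((List.range T).map (pvEqs toks W)).take (j+1)).countP id : Nat) : Int))) i 0 == w)
          ∘ (fun k : Nat => (0 : Int) + (k : Int)))
        = (List.range (T - W + 1)).countP (pvWin toks W) := by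
      apply List.countP_congr
      intro iN hiN
      simp only [List.mem_range] at hiN
      simp only [Function.comp, zero_add]
      rw [show ((iN : Int) + w) = ((iN + W : Nat) : Int) by omega]
      rw [PySem.List.pyGetD_natCast, PySem.List.pyGetD_natCast]
      rw [pvPref_getD' _ T hbs (iN + W) (by omega), pvPref_getD' _ T hbs iN (by omega)]
      rw [pvTake_countP toks W (iN + W) T (by omega), pvTake_countP toks W iN T (by omega)]
      rw [pvWindow_count toks W iN, beq_iff_eq]
      constructor
      · intro h
        exact (pvCount_eq_W_iff toks W iN).mp (by omega)
      · intro h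
        have := (pvCount_eq_W_iff toks W iN).mpr h
        omega
    rw [hcntB]
    -- finish: both are r, or both insert the same positive count
    rw [pvBump_fresh r w hk hc]
    by_cases hz : (List.range (T - W + 1)).countP (pvWin toks W) = 0
    · simp [hz]
    · have : (((List.range (T - W + 1)).countP (pvWin toks W) : Nat) : Int) * 1 ≠ 0 := by
        simp [hz]
      rw [if_neg hz, if_pos this, mul_one]
  · -- degenerate case: fewer than 2w tokens, both sides leave the dict unchanged
    have hz : (List.range T).countP (fun (t : Nat) =>
          PySem.List.slice toks (some (w + (t : Int))) (some (w + (t : Int) + w)) ==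
          PySem.List.slice toks (some (w + (t : Int) - w)) (some (w + (t : Int)))) = 0 := by
      rw [List.countP_eq_zero]
      intro t ht
      simp only [List.mem_range] at ht
      have hWN : W ≤ N := by omega
      rw [show w + (t : Int) - w = ((t : Nat) : Int) by omega]
      rw [show w + (t : Int) + w = ((W + t + W : Nat) : Int) by omega]
      rw [show w + (t : Int) = ((W + t : Nat) : Int) by omega]
      rw [PySem.List.slice_natCast, PySem.List.slice_natCast]
      rw [show W + t + W - (W + t) = W by omega, show W + t - t = W by omega]
      intro hp
      have := (pvCondA_iff toks W t hW1 (by omega) hWN).mp hp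
      omega
    rw [hz]
    rw [PySem.List.pyRange_one_eq_nil (show (T : Int) - w + 1 ≤ 0 by omega)]
    simp [pvBump]

theorem pvStepB_keys_nodup (toks : List String) (w : Int) (r : PySem.Dict Int Int)
    (hk : r.keys.Nodup) : (pvStepB toks r w).keys.Nodup := by
  simp only [pvStepB]
  split
  · exact PySem.Dict.nodup_keys_insert _ _ _ hk
  · exact hk

theorem pvStepB_contains (toks : List String) (w w' : Int) (r : PySem.Dict Int Int)
    (hne : w' ≠ w) (hc : r.contains w' = false) :
    (pvStepB toks r w).contains w' = false := by
  simp only [pvStepB]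
  split
  · rw [PySem.Dict.contains_insert]
    simp [hne, hc]
  · exact hc

theorem pvOuter (toks : List String) (ws : List Int) (r : PySem.Dict Int Int)
    (hnd : ws.Nodup) (hpos : ∀ w ∈ ws, 1 ≤ w)
    (hk : r.keys.Nodup) (hf : ∀ w ∈ ws, r.contains w = false) :
    ws.foldl (pvStepA toks) r = ws.foldl (pvStepB toks) r := by
  induction ws generalizing r with
  | nil => rfl
  | cons w ws ih =>
    simp only [List.foldl]
    rw [pvStep_eq toks w (hpos w (by simp)) r hk (hf w (by simp))]
    exact ih _ (by simp_all) (fun w' h => hpos w' (by simp [h]))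
      (pvStepB_keys_nodup toks w r hk)
      (fun w' h => pvStepB_contains toks w w' r
        (by rintro rfl; exact (List.nodup_cons.1 hnd).1 h) (hf w' (by simp [h])))

theorem pvRange_nodup (a b : Int) : (PySem.List.pyRange a b 1).Nodup := by
  rw [PySem.List.pyRange_one]
  exact List.nodup_range.map (fun x y h => by omega)

-- ===== VERDICT (by name: the statement is the Claim_ definition above) =====
theorem check_repeated_words_spec : Claim_equal_check_repeated_words := by
  intro text max_window _
  unfold Spec_check_repeated_words check_repeated_words check_repeated_words_alt
  exact congrArg PySem.Dict.items
    (pvOuter _ _ _ (pvRange_nodup 1 (max_window + 1))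
      (fun w hw => ((PySem.List.mem_pyRange_one).1 hw).1)
      (by simp [PySem.Dict.keys_empty])
      (fun w _ => PySem.Dict.contains_empty _))
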